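-- pv_equiv track=rewrite | github.com/Eric-Bourry/pssi | trunk/plugins/sim/interpreters.py | interpretHexString
-- ===== SOURCE A (Python) =====
-- def interpretHexString(value):
--     txt = ""
--     for c in value:
--         if c == 0xff:
--             break
--         txt += "%02x" % c
--     if len(txt) == 0:
--         return "No information"
--     return txt
-- ===== SOURCE B (Python) =====
-- def _fmt(xs):
--     # divide and conquer: returns (hex of the prefix before the first 0xff in xs,
--     #                              whether xs contains the 0xff terminator)
--     if len(xs) == 0:
--         return ("", False)
--     if len(xs) == 1:
--         c = xs[0]
--         if c == 0xff:
--             return ("", True)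
--         return ("%02x" % c, False)
--     mid = len(xs) // 2
--     left, stop = _fmt(xs[:mid])
--     if stop:
--         return (left, True)
--     right, stop2 = _fmt(xs[mid:])
--     return (left + right, stop2)
--
-- def interpretHexString(value):
--     txt, _ = _fmt(list(value))
--     if txt == "":
--         return "No information"
--     return txt
-- ===== Notes on version B (the rewrite author's own statement) =====
-- stated objective: alternative
-- what changed: Replaces A's linear fused test-and-format loop with a divide-and-conquer recursion: split the list in half, format each half recursively, and propagate a terminator-seen flag so everything after the first 0xff is discarded.
import Mathlib
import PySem

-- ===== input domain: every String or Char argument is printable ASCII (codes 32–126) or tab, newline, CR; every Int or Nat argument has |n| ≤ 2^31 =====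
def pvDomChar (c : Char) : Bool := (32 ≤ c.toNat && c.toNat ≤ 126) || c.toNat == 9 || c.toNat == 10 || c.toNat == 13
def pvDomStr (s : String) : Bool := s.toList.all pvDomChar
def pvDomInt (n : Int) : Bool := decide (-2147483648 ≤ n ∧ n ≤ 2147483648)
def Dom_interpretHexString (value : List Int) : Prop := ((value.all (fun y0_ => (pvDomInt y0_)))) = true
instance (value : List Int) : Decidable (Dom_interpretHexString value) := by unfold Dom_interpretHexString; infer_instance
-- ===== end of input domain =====

-- B replaces A's linear fused test-and-format loop with a divide-and-conquer recursion
-- that splits the list in half and propagates a terminator-seen flag (objective: alternative).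

-- ===== PORT A =====
-- "%02x" % c : Python's sign-magnitude lowercase hex with zero-padding to total width 2
-- (a negative value is '-' followed by the hex of |c|, never zero-padded at width 2).
def hexA (c : Int) : String :=
  if c < 0 then "-" ++ String.ofList (Nat.toDigits 16 (-c).toNat)
  else
    let s := String.ofList (Nat.toDigits 16 c.toNat)
    if s.length < 2 then "0" ++ s else s

-- the for-loop with break, carrying the accumulated txt
def loopA : List Int → String → String
  | [], txt => txt
  | c :: rest, txt => if c = 255 then txt else loopA rest (txt ++ hexA c)

def interpretHexString (value : List Int) : String :=
  let txt := loopA value ""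
  if txt = "" then "No information" else txt

-- ===== PORT B =====
-- same "%02x" formatting
def fmtByte (c : Int) : String :=
  if c < 0 then "-" ++ String.ofList (Nat.toDigits 16 (-c).toNat)
  else
    let s := String.ofList (Nat.toDigits 16 c.toNat)
    if s.length < 2 then "0" ++ s else s

-- divide and conquer: (hex of the prefix before the first 0xff, terminator seen?)
def fmtB : List Int → String × Bool
  | [] => ("", false)
  | [c] => if c = 255 then ("", true) else (fmtByte c, false)
  | x :: y :: t =>
    let mid := (x :: y :: t).length / 2
    let l := fmtB ((x :: y :: t).take mid)
    if l.2 then (l.1, true)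
    else
      let r := fmtB ((x :: y :: t).drop mid)
      (l.1 ++ r.1, r.2)
termination_by xs => xs.length
decreasing_by
  all_goals simp [List.length_take, List.length_drop]; omega

def interpretHexString_alt (value : List Int) : String :=
  let txt := (fmtB value).1
  if txt = "" then "No information" else txt

-- ===== PRECONDITION & SPEC =====
def Spec_interpretHexString (value : List Int) (out : String) : Prop := out = interpretHexString_alt value
instance (value : List Int) (out : String) : Decidable (Spec_interpretHexString value out) := by unfold Spec_interpretHexString; infer_instance

-- ===== CLAIM =====
def Claim_equal_interpretHexString : Prop := ∀ (value : List Int), Dom_interpretHexString value → Spec_interpretHexString value (interpretHexString value)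

-- ===== LEMMAS AND PROOFS =====

theorem fmtByte_eq_hexA : fmtByte = hexA := rfl

-- the intended meaning of both programs' core: the formatted prefix before the first 255
def hexPrefix (xs : List Int) : List Char :=
  ((xs.takeWhile (fun c => !(c == 255))).map (fun c => (hexA c).toList)).flatten

-- A's loop accumulates exactly the formatted prefix before the first 255
theorem loopA_toList (value : List Int) : ∀ (txt : String),
    (loopA value txt).toList = txt.toList ++ hexPrefix value := by
  induction value with
  | nil => intro txt; simp [loopA, hexPrefix]
  | cons x rest ih =>
    intro txt
    by_cases hx : x = 255
    · subst hx; simp [loopA, hexPrefix, List.takeWhile]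
    · have hb : (x == (255 : Int)) = false := by simp [hx]
      simp only [loopA, hexPrefix, List.takeWhile] at *
      rw [if_neg hx, ih]
      simp [hb]

-- B's divide-and-conquer computes the same prefix, plus the membership flag
theorem hexPrefix_cons (c : Int) (xs : List Int) :
    hexPrefix (c :: xs) = if c = 255 then [] else (hexA c).toList ++ hexPrefix xs := by
  by_cases hc : c = 255 <;> simp [hexPrefix, hc]

theorem hexPrefix_append (a b : List Int) :
    hexPrefix (a ++ b)
      = if (255 : Int) ∈ a then hexPrefix a else hexPrefix a ++ hexPrefix b := by
  induction a with
  | nil => simp [hexPrefix]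
  | cons c a ih =>
    by_cases hc : c = (255 : Int)
    · simp [hexPrefix_cons, hc]
    · by_cases hm : (255 : Int) ∈ a <;>
        simp [hexPrefix_cons, hc, hm, ih, eq_comm]

-- B's divide-and-conquer computes the same prefix, plus the membership flag
theorem fmtB_spec (xs : List Int) :
    (fmtB xs).1.toList = hexPrefix xs ∧ (fmtB xs).2 = decide ((255 : Int) ∈ xs) := by
  induction xs using fmtB.induct with
  | case1 => simp [fmtB, hexPrefix]
  | case2 => simp [fmtB, hexPrefix, List.takeWhile]
  | case3 c hc =>
    have hb : (c == (255 : Int)) = false := by simp [hc]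
    simp [fmtB, hexPrefix, List.takeWhile, hc, hb, fmtByte_eq_hexA, eq_comm]
  | case4 x y t mid l hstop ihl =>
    -- left half contains the terminator: the result is the left result
    have heq : fmtB (x :: y :: t) = ((fmtB ((x :: y :: t).take mid)).1, true) := by
      rw [fmtB]; exact if_pos hstop
    have hsplit : (x :: y :: t).take mid ++ (x :: y :: t).drop mid = x :: y :: t :=
      List.take_append_drop _ _
    have hmem : (255 : Int) ∈ (x :: y :: t).take mid :=
      of_decide_eq_true (ihl.2.symm.trans hstop)
    have h2 : hexPrefix (x :: y :: t) = hexPrefix ((x :: y :: t).take mid) := by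
      conv_lhs => rw [← hsplit]
      rw [hexPrefix_append, if_pos hmem]
    refine ⟨?_, ?_⟩
    · rw [heq, h2]; exact ihl.1
    · rw [heq]
      have hm : (255 : Int) ∈ x :: y :: t := hsplit ▸ List.mem_append_left _ hmem
      simp [hm]
  | case5 x y t mid l hstop ihl ihr =>
    -- no terminator in the left half: concatenate both halves
    have heq : fmtB (x :: y :: t)
        = ((fmtB ((x :: y :: t).take mid)).1 ++ (fmtB ((x :: y :: t).drop mid)).1,
           (fmtB ((x :: y :: t).drop mid)).2) := by
      rw [fmtB]; exact if_neg hstop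
    have hsplit : (x :: y :: t).take mid ++ (x :: y :: t).drop mid = x :: y :: t :=
      List.take_append_drop _ _
    have hnomem : (255 : Int) ∉ (x :: y :: t).take mid := by
      rw [Bool.not_eq_true] at hstop
      exact of_decide_eq_false (ihl.2.symm.trans hstop)
    have h2 : hexPrefix (x :: y :: t)
        = hexPrefix ((x :: y :: t).take mid) ++ hexPrefix ((x :: y :: t).drop mid) := by
      conv_lhs => rw [← hsplit]
      rw [hexPrefix_append, if_neg hnomem]
    refine ⟨?_, ?_⟩
    · rw [heq]
      show ((fmtB ((x :: y :: t).take mid)).1 ++ (fmtB ((x :: y :: t).drop mid)).1).toList = _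
      rw [String.toList_append, ihl.1, ihr.1, h2]
    · rw [heq]
      show (fmtB ((x :: y :: t).drop mid)).2 = decide ((255 : Int) ∈ x :: y :: t)
      rw [ihr.2]
      refine decide_eq_decide.mpr ⟨fun h => hsplit ▸ List.mem_append_right _ h, fun h => ?_⟩
      rw [← hsplit] at h
      rcases List.mem_append.mp h with h | h
      · exact absurd h hnomem
      · exact h

-- ===== VERDICT =====
theorem interpretHexString_spec : Claim_equal_interpretHexString := by
  intro value _
  unfold Spec_interpretHexString interpretHexString interpretHexString_alt
  have h : loopA value "" = (fmtB value).1 := by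
    apply String.toList_inj.mp
    rw [loopA_toList, (fmtB_spec value).1]
    simp
  simp only [h]
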